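-- pv_equiv track=rewrite | github.com/valmunos/Project-Euler | euler 54.py | convert_faces
-- ===== SOURCE A (Python) =====
-- face = {'T':10, 'J':11, 'Q': 12, 'K': 13, 'A': 14}
--
-- def convert_faces(s):
--     res = []
--     for c in s:
--         if c in face.keys():
--             res.append(face[c])
--         else: res.append(int(c))
--     res.sort()
--     return res
-- ===== SOURCE B (Python) =====
-- face = {'T': 10, 'J': 11, 'Q': 12, 'K': 13, 'A': 14}
--
-- def convert_faces(s):
--     # counting sort: one conversion pass filling a 15-slot frequency table,
--     # then one ascending walk emitting each value count-many times
--     counts = [0] * 15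
--     for c in s:
--         v = face[c] if c in face else int(c)
--         counts[v] += 1
--     res = []
--     for v in range(15):
--         res.extend([v] * counts[v])
--     return res
-- ===== Notes on version B (the rewrite author's own statement) =====
-- stated objective: alternative
-- what changed: B replaces A's build-then-comparison-sort with a counting sort: one pass fills a 15-slot frequency table over the value range 0..14 and a second ascending walk emits each value count-many times, so no sort call remains.
import Mathlib
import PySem

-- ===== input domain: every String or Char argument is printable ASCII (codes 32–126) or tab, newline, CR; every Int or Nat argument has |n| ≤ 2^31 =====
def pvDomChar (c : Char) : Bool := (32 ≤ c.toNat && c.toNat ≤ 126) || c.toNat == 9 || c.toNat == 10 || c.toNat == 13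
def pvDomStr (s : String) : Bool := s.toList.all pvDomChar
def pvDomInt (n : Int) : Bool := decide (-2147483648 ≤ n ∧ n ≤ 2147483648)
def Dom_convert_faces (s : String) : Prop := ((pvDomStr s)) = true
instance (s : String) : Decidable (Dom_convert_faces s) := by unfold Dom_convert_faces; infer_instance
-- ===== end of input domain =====

-- B replaces A's comparison sort by a counting sort: one conversion pass fills a
-- 15-slot frequency table and one ascending walk emits the result (objective: alternative).

-- ===== PORT A =====
-- the module-level dict 'face'
def pvFace : PySem.Dict Char Int :=
  PySem.Dict.ofList [('T', 10), ('J', 11), ('Q', 12), ('K', 13), ('A', 14)]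

-- face[c] if c in face else int(c); int(c) is PySem.Int.ofStr? (none = ValueError,
-- excluded by Pre_; .getD 0 is unreachable inside Pre_)
def pvConv (c : Char) : Int :=
  match PySem.Dict.get? pvFace c with
  | some v => v
  | none => (PySem.Int.ofStr? (String.ofList [c])).getD 0

def convert_faces (s : String) : List Int :=
  let res := s.toList.foldl (fun res c => res ++ [pvConv c]) []
  PySem.List.sorted res (fun x => x) false

-- ===== PORT B =====
def convert_faces_alt (s : String) : List Int :=
  let counts : List Nat :=
    s.toList.foldl (fun (counts : List Nat) c =>
        counts.set (pvConv c).toNat (counts[(pvConv c).toNat]! + 1))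
      (List.replicate 15 0)
  (List.range 15).foldl (fun res (v : Nat) => res ++ List.replicate counts[v]! (v : Int)) []

-- ===== PRECONDITION & SPEC =====
-- Pre_ excludes exactly the strings containing a character that is neither a digit
-- nor a face letter: there A (and B) raise ValueError.
def Pre_convert_faces (s : String) : Prop :=
  s.toList.all (fun c => c.isDigit || c ∈ (['T', 'J', 'Q', 'K', 'A'] : List Char)) = true
instance (s : String) : Decidable (Pre_convert_faces s) := by unfold Pre_convert_faces; infer_instance

def pvWitness_convert_faces : String := "AT37K"

def Spec_convert_faces (s : String) (out : List Int) : Prop := out = convert_faces_alt s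
instance (s : String) (out : List Int) : Decidable (Spec_convert_faces s out) := by
  unfold Spec_convert_faces; infer_instance

-- ===== CLAIM (what is proved, stated in full; the proofs are below) =====
def Claim_equal_convert_faces : Prop :=
  ∀ (s : String), Dom_convert_faces s → Pre_convert_faces s →
    Spec_convert_faces s (convert_faces s)

-- ===== LEMMAS AND PROOFS =====

-- A's append-fold builds map pvConv
theorem pvFoldl_map (l : List Char) (acc : List Int) :
    l.foldl (fun res c => res ++ [pvConv c]) acc = acc ++ l.map pvConv := by
  induction l generalizing acc with
  | nil => simp
  | cons c t ih => simp [ih]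

-- conversion range under Pre_
theorem pvChar_eq_of_toNat {c d : Char} (h : c.toNat = d.toNat) : c = d :=
  Char.ext (UInt32.toNat_inj.mp h)

theorem pvDigit_mem {c : Char} (h : c.isDigit = true) :
    c ∈ (['0','1','2','3','4','5','6','7','8','9'] : List Char) := by
  have hb : 48 ≤ c.toNat ∧ c.toNat ≤ 57 := by
    simp [Char.isDigit] at h; exact ⟨h.1, h.2⟩
  have hd : c.toNat = 48 ∨ c.toNat = 49 ∨ c.toNat = 50 ∨ c.toNat = 51 ∨ c.toNat = 52 ∨
      c.toNat = 53 ∨ c.toNat = 54 ∨ c.toNat = 55 ∨ c.toNat = 56 ∨ c.toNat = 57 := by omega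
  rcases hd with h|h|h|h|h|h|h|h|h|h
  · have e : c = '0' := pvChar_eq_of_toNat (by rw [h]; rfl); subst e; decide
  · have e : c = '1' := pvChar_eq_of_toNat (by rw [h]; rfl); subst e; decide
  · have e : c = '2' := pvChar_eq_of_toNat (by rw [h]; rfl); subst e; decide
  · have e : c = '3' := pvChar_eq_of_toNat (by rw [h]; rfl); subst e; decide
  · have e : c = '4' := pvChar_eq_of_toNat (by rw [h]; rfl); subst e; decide
  · have e : c = '5' := pvChar_eq_of_toNat (by rw [h]; rfl); subst e; decide
  · have e : c = '6' := pvChar_eq_of_toNat (by rw [h]; rfl); subst e; decide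
  · have e : c = '7' := pvChar_eq_of_toNat (by rw [h]; rfl); subst e; decide
  · have e : c = '8' := pvChar_eq_of_toNat (by rw [h]; rfl); subst e; decide
  · have e : c = '9' := pvChar_eq_of_toNat (by rw [h]; rfl); subst e; decide

theorem pvConv_range {c : Char}
    (h : c.isDigit = true ∨ c ∈ (['T', 'J', 'Q', 'K', 'A'] : List Char)) :
    0 ≤ pvConv c ∧ pvConv c < 15 := by
  rcases h with h | h
  · have := pvDigit_mem h
    fin_cases this <;> decide
  · fin_cases h <;> decide

-- counts list after the fold = pointwise counts of the converted prefix
def pvCounts (l : List Int) : List Nat := (List.range 15).map (fun (v : Nat) => l.count (v : Int))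

theorem pvCounts_length (l : List Int) : (pvCounts l).length = 15 := by
  unfold pvCounts; rw [List.length_map, List.length_range]

theorem pvCounts_getElem (l : List Int) (i : Nat) (_hi : i < 15)
    (h : i < (pvCounts l).length) : (pvCounts l)[i] = l.count (i : Int) := by
  unfold pvCounts
  rw [List.getElem_map, List.getElem_range]

theorem pvCounts_get (l : List Int) {v : Nat} (hv : v < 15) :
    (pvCounts l)[v]! = l.count (v : Int) := by
  have hlen : v < (pvCounts l).length := by rw [pvCounts_length]; exact hv
  rw [List.getElem!_eq_getElem?_getD, List.getElem?_eq_getElem hlen, Option.getD_some,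
    pvCounts_getElem l v hv hlen]

theorem pvCounts_step (acc : List Int) (c : Char)
    (hc : 0 ≤ pvConv c ∧ pvConv c < 15) :
    (pvCounts acc).set (pvConv c).toNat ((pvCounts acc)[(pvConv c).toNat]! + 1)
      = pvCounts (acc ++ [pvConv c]) := by
  have hcn : (pvConv c).toNat < 15 := by omega
  have hv : ((pvConv c).toNat : Int) = pvConv c := by omega
  apply List.ext_getElem
  · rw [List.length_set, pvCounts_length, pvCounts_length]
  · intro i h1 h2
    have hi : i < 15 := by rw [pvCounts_length] at h2; exact h2
    rw [List.getElem_set, pvCounts_getElem (acc ++ [pvConv c]) i hi h2, List.count_append]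
    by_cases he : (pvConv c).toNat = i
    · subst he
      rw [if_pos rfl, pvCounts_get acc hcn, hv]
      simp
    · rw [if_neg he,
        pvCounts_getElem acc i hi (by rw [pvCounts_length]; exact hi)]
      have hz : List.count ((i : Nat) : Int) [pvConv c] = 0 := by
        rw [List.count_eq_zero]
        intro hmem
        rw [List.mem_singleton] at hmem
        omega
      rw [hz, Nat.add_zero]

theorem pvCounts_fold (t : List Char) (acc : List Int)
    (hp : ∀ c ∈ t, c.isDigit = true ∨ c ∈ (['T','J','Q','K','A'] : List Char)) :
    t.foldl (fun (counts : List Nat) c =>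
        counts.set (pvConv c).toNat (counts[(pvConv c).toNat]! + 1)) (pvCounts acc)
      = pvCounts (acc ++ t.map pvConv) := by
  induction t generalizing acc with
  | nil => simp
  | cons c t ih =>
    rw [List.foldl_cons, pvCounts_step acc c (pvConv_range (hp c (by simp))),
      ih (acc ++ [pvConv c]) (fun c hc => hp c (by simp [hc]))]
    simp

theorem pvCounts_invariant (l : List Char)
    (hp : ∀ c ∈ l, c.isDigit = true ∨ c ∈ (['T','J','Q','K','A'] : List Char)) :
    l.foldl (fun (counts : List Nat) c =>
        counts.set (pvConv c).toNat (counts[(pvConv c).toNat]! + 1))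
      (List.replicate 15 0) = pvCounts (l.map pvConv) := by
  have h0 : (List.replicate 15 (0:Nat)) = pvCounts [] := by
    simp [pvCounts]
  rw [h0, pvCounts_fold l [] hp]
  simp

-- the emission fold as a flatMap
theorem pvEmit_flatMap (l : List Int) (n : Nat) :
    (List.range n).foldl (fun res (v : Nat) => res ++ List.replicate (pvCounts l)[v]! (v : Int)) []
      = (List.range n).flatMap (fun (v : Nat) => List.replicate (pvCounts l)[v]! (v : Int)) := by
  induction n with
  | zero => simp
  | succ n ih =>
    rw [List.range_succ, List.foldl_append, List.flatMap_append, ih]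
    simp

theorem pvSum_ite (n k c : Nat) (hk : k < n) :
    ((List.range n).map (fun v => if v = k then c else 0)).sum = c := by
  induction n with
  | zero => omega
  | succ n ih =>
    rw [List.range_succ, List.map_append, List.sum_append]
    by_cases h : k < n
    · rw [ih h]
      have : ¬ (n = k) := by omega
      simp [this]
    · have hk' : k = n := by omega
      have hz : ((List.range n).map (fun v => if v = k then c else 0)).sum = 0 := by
        apply List.sum_eq_zero
        intro x hx
        rw [List.mem_map] at hx
        obtain ⟨v, hv, rfl⟩ := hx
        rw [List.mem_range] at hv
        have : ¬ (v = k) := by omega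
        simp [this]
      rw [hz]
      simp [hk']

-- B's output is a permutation of the converted list
theorem pvEmit_perm (l : List Int) (hl : ∀ x ∈ l, 0 ≤ x ∧ x < 15) :
    ((List.range 15).flatMap (fun (v : Nat) => List.replicate (pvCounts l)[v]! (v : Int))).Perm l := by
  rw [List.perm_iff_count]
  intro a
  rw [List.count_flatMap]
  simp only [Function.comp_def]
  by_cases ha : 0 ≤ a ∧ a < 15
  · have hnat : a.toNat < 15 := by omega
    have hcast : ((a.toNat : Nat) : Int) = a := by omega
    have hcongr : ∀ v ∈ List.range 15,
        (List.replicate (pvCounts l)[v]! (v : Int)).count a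
          = if v = a.toNat then l.count a else 0 := by
      intro v hv
      rw [List.mem_range] at hv
      rw [List.count_replicate]
      simp only [beq_iff_eq]
      by_cases he : v = a.toNat
      · subst he
        rw [if_pos hcast, if_pos rfl, pvCounts_get l hv, hcast]
      · have hne : ¬ ((v : Int) = a) := by intro hh; apply he; omega
        rw [if_neg hne, if_neg he]
    rw [List.map_congr_left hcongr, pvSum_ite 15 a.toNat (l.count a) hnat]
  · have h1 : ∀ v ∈ List.range 15, (List.replicate (pvCounts l)[v]! (v : Int)).count a = 0 := by
      intro v hv
      rw [List.mem_range] at hv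
      rw [List.count_replicate]
      simp only [beq_iff_eq]
      have hne : ¬ ((v : Int) = a) := by intro hh; apply ha; constructor <;> omega
      rw [if_neg hne]
    rw [List.map_congr_left h1]
    have h2 : l.count a = 0 := by
      rw [List.count_eq_zero]
      intro hmem
      exact ha (hl a hmem)
    rw [h2]
    simp

-- B's output is sorted (≤)
theorem pvEmit_pairwise (l : List Int) (n : Nat) :
    ((List.range n).flatMap (fun (v : Nat) => List.replicate (pvCounts l)[v]! (v : Int))).Pairwise (· ≤ ·) := by
  induction n with
  | zero => simp
  | succ n ih =>
    rw [List.range_succ, List.flatMap_append, List.pairwise_append]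
    refine ⟨ih, by simp [List.pairwise_replicate], ?_⟩
    intro x hx y hy
    simp only [List.mem_flatMap, List.mem_range, List.mem_replicate] at hx
    simp only [List.flatMap_cons, List.flatMap_nil, List.append_nil, List.mem_replicate] at hy
    obtain ⟨v, hv, _, rfl⟩ := hx
    rw [hy.2]
    exact_mod_cast Nat.le_of_lt hv

-- ===== VERDICT (by name: the statement is the Claim_ definition above) =====
theorem convert_faces_spec : Claim_equal_convert_faces := by
  intro s _ hpre
  unfold Spec_convert_faces convert_faces convert_faces_alt
  have hall : ∀ c ∈ s.toList, c.isDigit = true ∨ c ∈ (['T','J','Q','K','A'] : List Char) := by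
    unfold Pre_convert_faces at hpre
    rw [List.all_eq_true] at hpre
    intro c hc
    have := hpre c hc
    simpa using this
  rw [pvFoldl_map, List.nil_append, pvCounts_invariant s.toList hall, pvEmit_flatMap]
  have hrange : ∀ x ∈ s.toList.map pvConv, 0 ≤ x ∧ x < 15 := by
    intro x hx
    rw [List.mem_map] at hx
    obtain ⟨c, hc, rfl⟩ := hx
    exact pvConv_range (hall c hc)
  exact PySem.List.sorted_id_eq_of_perm_of_pairwise _ _
    (pvEmit_perm (s.toList.map pvConv) hrange)
    (pvEmit_pairwise (s.toList.map pvConv) 15)
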